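-- pv_equiv track=rewrite | github.com/ebad84/free-instagram-authless-downloader | instalibs.py | getInstagramUrlFromMediaId
-- ===== SOURCE A (Python) =====
-- def getInstagramUrlFromMediaId(media_id):
--     alphabet = 'ABCDEFGHIJKLMNOPQRSTUVWXYZabcdefghijklmnopqrstuvwxyz0123456789-_'
--     shortened_id = ''
--
--     while media_id > 0:
--         remainder = media_id % 64
--         # dual conversion sign gets the right ID for new posts
--         media_id = (media_id - remainder) // 64;
--         # remainder should be casted as an integer to avoid a type error.
--         shortened_id = alphabet[int(remainder)] + shortened_id
--
--     return 'https://instagram.com/p/' + shortened_id + '/'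
-- ===== SOURCE B (Python) =====
-- def getInstagramUrlFromMediaId(media_id):
--     alphabet = 'ABCDEFGHIJKLMNOPQRSTUVWXYZabcdefghijklmnopqrstuvwxyz0123456789-_'
--     p = 1
--     while p <= media_id:
--         p *= 64
--     shortened_id = ''
--     while p > 1:
--         p //= 64
--         shortened_id += alphabet[(media_id // p) % 64]
--     return 'https://instagram.com/p/' + shortened_id + '/'
-- ===== Notes on version B (the rewrite author's own statement) =====
-- stated objective: alternative
-- what changed: B builds the short-code most-significant-digit first: one loop finds the smallest alphabet-base power exceeding media_id, a second loop extracts each digit by dividing by that shrinking power and appends it, replacing A's least-significant-first divmod loop that prepends onto an accumulator.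
import Mathlib
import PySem

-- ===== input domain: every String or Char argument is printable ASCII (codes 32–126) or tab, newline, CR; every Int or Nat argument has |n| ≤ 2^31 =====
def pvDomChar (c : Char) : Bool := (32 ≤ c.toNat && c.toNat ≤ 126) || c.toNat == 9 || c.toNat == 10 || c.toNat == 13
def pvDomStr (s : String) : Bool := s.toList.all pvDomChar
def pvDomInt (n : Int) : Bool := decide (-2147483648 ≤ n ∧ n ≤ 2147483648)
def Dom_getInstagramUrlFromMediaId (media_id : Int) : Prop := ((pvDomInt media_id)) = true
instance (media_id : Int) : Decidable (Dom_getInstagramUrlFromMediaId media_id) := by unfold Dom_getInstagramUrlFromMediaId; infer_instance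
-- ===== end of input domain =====

-- B emits the base-64 digits most-significant-first (find the smallest power of 64
-- exceeding media_id, then extract digits with (media_id // p) % 64) instead of A's
-- least-significant-first prepend loop; an alternative of the same cost.

-- ===== PORT A =====
def pvAlphabet : String := "ABCDEFGHIJKLMNOPQRSTUVWXYZabcdefghijklmnopqrstuvwxyz0123456789-_"

-- alphabet[int(remainder)]; the index is always in [0,64) when reached, so getD is never hit
def pvDigit (r : Int) : String := ((PySem.Str.pyGet? pvAlphabet r).getD 'A').toString

-- the while loop of A: shortened_id is the accumulator, digits prepended
def pvLoopA (m : Int) (acc : String) : String :=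
  if _h : 0 < m then
    pvLoopA (PySem.Int.floordiv (m - PySem.Int.mod m 64) 64)
            (pvDigit (PySem.Int.mod m 64) ++ acc)
  else acc
termination_by m.toNat
decreasing_by
  rw [PySem.Int.floordiv_eq_ediv_of_pos (by norm_num : (0:Int) < 64),
      PySem.Int.mod_eq_emod_of_pos (by norm_num : (0:Int) < 64)]
  omega

def getInstagramUrlFromMediaId (media_id : Int) : String :=
  "https://instagram.com/p/" ++ pvLoopA media_id "" ++ "/"

-- ===== PORT B =====
-- first loop of B: while p <= media_id: p *= 64  (the '0 < p' conjunct only makes the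
-- recursion total; p starts at 1 and stays positive, so it never changes the value)
def pvPow (m p : Int) : Int :=
  if h : 0 < p ∧ p ≤ m then pvPow m (p * 64) else p
termination_by (m + 1 - p).toNat
decreasing_by obtain ⟨h1, h2⟩ := h; omega

-- second loop of B: while p > 1: p //= 64; s += alphabet[(m // p) % 64]
def pvBuild (m p : Int) (s : String) : String :=
  if _h : 1 < p then
    pvBuild m (PySem.Int.floordiv p 64)
      (s ++ pvDigit (PySem.Int.mod (PySem.Int.floordiv m (PySem.Int.floordiv p 64)) 64))
  else s
termination_by p.toNat
decreasing_by
  rw [PySem.Int.floordiv_eq_ediv_of_pos (by norm_num : (0:Int) < 64)]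
  have h1 : p / 64 < p := (Int.ediv_lt_iff_lt_mul (by norm_num)).mpr (by omega)
  have h2 : 0 ≤ p / 64 := Int.ediv_nonneg (by omega) (by norm_num)
  omega

def getInstagramUrlFromMediaId_alt (media_id : Int) : String :=
  "https://instagram.com/p/" ++ pvBuild media_id (pvPow media_id 1) "" ++ "/"

-- ===== PRECONDITION & SPEC =====
def Spec_getInstagramUrlFromMediaId (media_id : Int) (out : String) : Prop := out = getInstagramUrlFromMediaId_alt media_id
instance (media_id : Int) (out : String) : Decidable (Spec_getInstagramUrlFromMediaId media_id out) := by unfold Spec_getInstagramUrlFromMediaId; infer_instance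

-- ===== CLAIM (what is proved, stated in full; the proofs are below) =====
def Claim_equal_getInstagramUrlFromMediaId : Prop := ∀ (media_id : Int), Dom_getInstagramUrlFromMediaId media_id → Spec_getInstagramUrlFromMediaId media_id (getInstagramUrlFromMediaId media_id)

-- ===== LEMMAS AND PROOFS =====

-- proof-only canonical forms: the digit string of m, LSD-recursion style …
def pvDigits (m : Int) : String :=
  if _h : m ≤ 0 then ""
  else pvDigits (PySem.Int.floordiv (m - PySem.Int.mod m 64) 64) ++ pvDigit (PySem.Int.mod m 64)
termination_by m.toNat
decreasing_by
  rw [PySem.Int.floordiv_eq_ediv_of_pos (by norm_num : (0:Int) < 64),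
      PySem.Int.mod_eq_emod_of_pos (by norm_num : (0:Int) < 64)]
  omega

-- … and the k-digit MSD-first padded form
def pvPad : Nat → Int → String
  | 0, _ => ""
  | k+1, m => pvDigit ((m / 64 ^ k) % 64) ++ pvPad k m

theorem pvLoopA_eq_digits (m : Int) (acc : String) : pvLoopA m acc = pvDigits m ++ acc := by
  by_cases h : 0 < m
  · rw [pvLoopA, dif_pos h, pvDigits, dif_neg (by omega : ¬ m ≤ 0),
        pvLoopA_eq_digits, String.append_assoc]
  · rw [pvLoopA, dif_neg h, pvDigits, dif_pos (by omega : m ≤ 0)]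
    simp
termination_by m.toNat
decreasing_by
  rw [PySem.Int.floordiv_eq_ediv_of_pos (by norm_num : (0:Int) < 64),
      PySem.Int.mod_eq_emod_of_pos (by norm_num : (0:Int) < 64)]
  omega

theorem pvSelf_sub_mod (m : Int) :
    PySem.Int.floordiv (m - PySem.Int.mod m 64) 64 = m / 64 := by
  rw [PySem.Int.mod_eq_emod_of_pos (by norm_num : (0:Int) < 64),
      PySem.Int.floordiv_eq_ediv_of_pos (by norm_num : (0:Int) < 64)]
  have h := Int.ediv_add_emod m 64
  have : m - m % 64 = 64 * (m / 64) := by omega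
  rw [this, Int.mul_ediv_cancel_left _ (by norm_num)]

theorem pvBuild_eq_pad (k : Nat) (m : Int) (s : String) :
    pvBuild m (64 ^ k) s = s ++ pvPad k m := by
  induction k generalizing s with
  | zero => rw [pvBuild, dif_neg (by norm_num), pvPad]; simp
  | succ k ih =>
    rw [pvBuild, dif_pos (one_lt_pow₀ (by norm_num) k.succ_ne_zero : (1:Int) < 64 ^ (k+1)),
        PySem.Int.floordiv_eq_ediv_of_pos (by norm_num : (0:Int) < 64)]
    have hp : (64:Int) ^ (k+1) / 64 = 64 ^ k := by
      rw [pow_succ, Int.mul_ediv_cancel _ (by norm_num)]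
    rw [hp, PySem.Int.floordiv_eq_ediv_of_pos (by positivity : (0:Int) < 64 ^ k),
        PySem.Int.mod_eq_emod_of_pos (by norm_num : (0:Int) < 64), ih]
    rw [pvPad, String.append_assoc]

theorem pvPad_shift (k : Nat) (m : Int) :
    pvPad (k+1) m = pvPad k (m / 64) ++ pvDigit (m % 64) := by
  induction k generalizing m with
  | zero => simp [pvPad]
  | succ k ih =>
    rw [pvPad, ih, pvPad]
    have : m / 64 / 64 ^ k = m / 64 ^ (k+1) := by
      rw [Int.ediv_ediv_eq_ediv_mul, ← pow_succ']
      norm_num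
    rw [this, String.append_assoc]

theorem pvDigits_eq_pad (k : Nat) (m : Int)
    (h1 : 64 ^ k ≤ m) (h2 : m < 64 ^ (k+1)) : pvDigits m = pvPad (k+1) m := by
  induction k generalizing m with
  | zero =>
    rw [pvDigits, dif_neg (by simp at h1; omega), pvSelf_sub_mod,
        PySem.Int.mod_eq_emod_of_pos (by norm_num : (0:Int) < 64)]
    have hm0 : m / 64 = 0 := Int.ediv_eq_zero_of_lt (by simp at h1; omega) (by simpa using h2)
    rw [hm0, pvDigits, dif_pos (by norm_num), pvPad, pvPad]
    simp
  | succ k ih =>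
    have hpos : (0:Int) < 64 ^ (k+1) := by positivity
    rw [pvDigits, dif_neg (by omega : ¬ m ≤ 0), pvSelf_sub_mod,
        PySem.Int.mod_eq_emod_of_pos (by norm_num : (0:Int) < 64)]
    have hl : 64 ^ k ≤ m / 64 := Int.le_ediv_iff_mul_le (by norm_num) |>.mpr
      (by rw [← pow_succ]; exact h1)
    have hr : m / 64 < 64 ^ (k+1) := Int.ediv_lt_iff_lt_mul (by norm_num) |>.mpr
      (by rw [← pow_succ]; exact h2)
    rw [ih _ hl hr, ← pvPad_shift]

theorem pvPow_spec (m p : Int) (hp : 0 < p) :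
    (m < p ∧ pvPow m p = p) ∨
    (∃ k : Nat, pvPow m p = p * 64 ^ (k+1) ∧ p * 64 ^ k ≤ m ∧ m < p * 64 ^ (k+1)) := by
  by_cases h : p ≤ m
  · right
    rcases pvPow_spec m (p * 64) (by omega) with ⟨hlt, heq⟩ | ⟨k, heq, hlo, hhi⟩
    · exact ⟨0, by rw [pvPow, dif_pos ⟨hp, h⟩, heq]; ring_nf,
        by simpa using h, by simpa [mul_comm] using hlt⟩
    · refine ⟨k+1, ?_, ?_, ?_⟩
      · rw [pvPow, dif_pos ⟨hp, h⟩, heq]; ring_nf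
      · calc p * 64 ^ (k+1) = p * 64 * 64 ^ k := by ring
          _ ≤ m := hlo
      · calc m < p * 64 * 64 ^ (k+1) := hhi
          _ = p * 64 ^ (k+2) := by ring
  · left
    exact ⟨by omega, by rw [pvPow, dif_neg (by omega)]⟩
termination_by (m + 1 - p).toNat
decreasing_by omega

-- ===== VERDICT (by name: the statement is the Claim_ definition above) =====
theorem getInstagramUrlFromMediaId_spec : Claim_equal_getInstagramUrlFromMediaId := by
  intro m _
  show _ = _
  unfold getInstagramUrlFromMediaId getInstagramUrlFromMediaId_alt
  rcases pvPow_spec m 1 (by norm_num) with ⟨hlt, heq⟩ | ⟨k, heq, hlo, hhi⟩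
  · -- m ≤ 0: both digit strings empty
    rw [heq, pvBuild, dif_neg (by norm_num), pvLoopA_eq_digits,
        pvDigits, dif_pos (by omega : m ≤ 0)]
    simp
  · simp only [one_mul] at heq hlo hhi
    rw [heq, pvBuild_eq_pad (k+1) m, pvLoopA_eq_digits, pvDigits_eq_pad k m hlo hhi]
    simp
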